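-- pv_equiv track=rewrite | github.com/jhuapl-boss/spdb | spdb/project/resource.py | get_downsampled_extent_dims
-- ===== SOURCE A (Python) =====
-- import math
--
-- def get_downsampled_extent_dims(num_hierarchy_levels, isotropic_level, hierarchy_method,
--                                 x_extent, y_extent, z_extent,
--                                 iso=False):
--     """Method to return a list, mapping resolution levels to coord frame extent dimensions
--
--     Args:
--         num_hierarchy_levels(int): Number of levels to compute
--         isotropic_level(iso): Resolution level closest to isotropic
--         hierarchy_method(str): Downsampling method (anisotropic | isotropic)
--         x_extent(int): extent in x dimension
--         y_extent(int): extent in y dimension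
--         z_extent(int): extent in z dimension
--         iso(bool): If requesting isotropic dimensions (for anisotropic channels)
--
--     Returns:
--         (list): List where each element is the voxel coords in [x,y,z]. Array index = resolution level
--     """
--     extent_dims = [[x_extent, y_extent, z_extent]]
--     for res in range(1, num_hierarchy_levels):
--         if hierarchy_method == "isotropic":
--             extent_dims.append([math.ceil(extent_dims[res-1][0] / 2.0),
--                                 math.ceil(extent_dims[res-1][1] / 2.0),
--                                 math.ceil(extent_dims[res-1][2] / 2.0)])
--         else:
--             # Anisotropic channel
--             if res > isotropic_level and iso is True:
--                 # You want the isotropic version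
--                 extent_dims.append([math.ceil(extent_dims[res-1][0] / 2.0),
--                                     math.ceil(extent_dims[res-1][1] / 2.0),
--                                     math.ceil(extent_dims[res-1][2] / 2.0)])
--             else:
--                 # You want the anisotropic version
--                 extent_dims.append([math.ceil(extent_dims[res-1][0] / 2.0),
--                                     math.ceil(extent_dims[res-1][1] / 2.0),
--                                     math.ceil(extent_dims[res-1][2])])
--     return extent_dims
-- ===== SOURCE B (Python) =====
-- import math
--
--
-- def get_downsampled_extent_dims(num_hierarchy_levels, isotropic_level, hierarchy_method,
--                                 x_extent, y_extent, z_extent,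
--                                 iso=False):
--     """Column-wise reimplementation: build the x, y and z dimension sequences in
--     three independent loops over the resolution levels, then zip them into rows."""
--     levels = range(1, num_hierarchy_levels)
--
--     def halve(v):
--         return math.ceil(v / 2.0)
--
--     x_dims = [x_extent]
--     for _ in levels:
--         x_dims.append(halve(x_dims[-1]))
--
--     y_dims = [y_extent]
--     for _ in levels:
--         y_dims.append(halve(y_dims[-1]))
--
--     z_dims = [z_extent]
--     for res in levels:
--         prev = z_dims[-1]
--         if hierarchy_method == "isotropic" or (res > isotropic_level and iso is True):
--             z_dims.append(halve(prev))
--         else: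
--             z_dims.append(prev)
--
--     return [list(t) for t in zip(x_dims, y_dims, z_dims)]
-- ===== Notes on version B (the rewrite author's own statement) =====
-- stated objective: alternative
-- what changed: A builds the table row-by-row, each iteration indexing the previous row; B computes the x, y and z dimension columns in three independent loops and then zips the columns into rows.
import Mathlib
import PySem

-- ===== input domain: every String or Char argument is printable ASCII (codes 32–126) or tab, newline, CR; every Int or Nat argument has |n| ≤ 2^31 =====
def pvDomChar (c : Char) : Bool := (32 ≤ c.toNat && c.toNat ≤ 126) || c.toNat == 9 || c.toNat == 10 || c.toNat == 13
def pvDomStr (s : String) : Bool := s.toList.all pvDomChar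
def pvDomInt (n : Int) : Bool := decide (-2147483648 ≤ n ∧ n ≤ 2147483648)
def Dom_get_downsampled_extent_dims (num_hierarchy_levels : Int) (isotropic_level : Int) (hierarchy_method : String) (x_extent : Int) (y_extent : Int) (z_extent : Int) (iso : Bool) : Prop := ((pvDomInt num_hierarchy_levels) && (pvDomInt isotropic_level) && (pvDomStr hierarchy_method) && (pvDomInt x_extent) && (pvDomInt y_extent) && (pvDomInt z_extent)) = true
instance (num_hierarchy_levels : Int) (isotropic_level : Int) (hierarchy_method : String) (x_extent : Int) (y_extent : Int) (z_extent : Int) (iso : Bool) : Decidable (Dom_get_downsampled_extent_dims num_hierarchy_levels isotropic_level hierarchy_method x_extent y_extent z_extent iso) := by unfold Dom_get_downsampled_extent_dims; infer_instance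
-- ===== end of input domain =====

-- B rebuilds the table column-by-column (three independent loops, then a zip) instead of
-- row-by-row; an alternative decomposition, not claimed faster.

-- math.ceil(v / 2.0) on an int v with |v| ≤ 2^31: the float division is exact
-- (|v| ≤ 2^53), so it equals the integer ceiling of v/2, i.e. floor((v+1)/2).
def pvCeilHalf (v : Int) : Int := PySem.Int.floordiv (v + 1) 2

-- ===== PORT A =====
-- one iteration of A's `for res in range(1, num_hierarchy_levels)` loop
def pvAStep (isotropic_level : Int) (hierarchy_method : String) (iso : Bool)
    (extent_dims : List (List Int)) (res : Int) : List (List Int) :=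
  -- extent_dims[res-1][0..2]; the index is always in range, pyGetD's default is never used
  let p0 := PySem.List.pyGetD (PySem.List.pyGetD extent_dims (res - 1) []) 0 0
  let p1 := PySem.List.pyGetD (PySem.List.pyGetD extent_dims (res - 1) []) 1 0
  let p2 := PySem.List.pyGetD (PySem.List.pyGetD extent_dims (res - 1) []) 2 0
  if hierarchy_method == "isotropic" then
    extent_dims ++ [[pvCeilHalf p0, pvCeilHalf p1, pvCeilHalf p2]]
  else if res > isotropic_level ∧ iso = true then
    extent_dims ++ [[pvCeilHalf p0, pvCeilHalf p1, pvCeilHalf p2]]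
  else
    -- math.ceil(int) is that int itself
    extent_dims ++ [[pvCeilHalf p0, pvCeilHalf p1, p2]]

def get_downsampled_extent_dims (num_hierarchy_levels : Int) (isotropic_level : Int) (hierarchy_method : String) (x_extent : Int) (y_extent : Int) (z_extent : Int) (iso : Bool) : List (List Int) :=
  (PySem.List.pyRange 1 num_hierarchy_levels 1).foldl
    (pvAStep isotropic_level hierarchy_method iso)
    [[x_extent, y_extent, z_extent]]

-- ===== PORT B =====
-- x_dims.append(halve(x_dims[-1])) (also used for y_dims)
def pvColStepXY (dims : List Int) (_res : Int) : List Int :=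
  dims ++ [pvCeilHalf (PySem.List.pyGetD dims (-1) 0)]

-- the z-column loop body
def pvColStepZ (isotropic_level : Int) (hierarchy_method : String) (iso : Bool)
    (dims : List Int) (res : Int) : List Int :=
  let prev := PySem.List.pyGetD dims (-1) 0
  if hierarchy_method == "isotropic" ∨ (res > isotropic_level ∧ iso = true) then
    dims ++ [pvCeilHalf prev]
  else
    dims ++ [prev]

def get_downsampled_extent_dims_alt (num_hierarchy_levels : Int) (isotropic_level : Int) (hierarchy_method : String) (x_extent : Int) (y_extent : Int) (z_extent : Int) (iso : Bool) : List (List Int) :=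
  let levels := PySem.List.pyRange 1 num_hierarchy_levels 1
  let x_dims := levels.foldl pvColStepXY [x_extent]
  let y_dims := levels.foldl pvColStepXY [y_extent]
  let z_dims := levels.foldl (pvColStepZ isotropic_level hierarchy_method iso) [z_extent]
  -- [list(t) for t in zip(x_dims, y_dims, z_dims)]
  (x_dims.zip (y_dims.zip z_dims)).map (fun t => [t.1, t.2.1, t.2.2])

-- ===== PRECONDITION & SPEC =====
def Spec_get_downsampled_extent_dims (num_hierarchy_levels : Int) (isotropic_level : Int) (hierarchy_method : String) (x_extent : Int) (y_extent : Int) (z_extent : Int) (iso : Bool) (out : List (List Int)) : Prop := out = get_downsampled_extent_dims_alt num_hierarchy_levels isotropic_level hierarchy_method x_extent y_extent z_extent iso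
instance (num_hierarchy_levels : Int) (isotropic_level : Int) (hierarchy_method : String) (x_extent : Int) (y_extent : Int) (z_extent : Int) (iso : Bool) (out : List (List Int)) : Decidable (Spec_get_downsampled_extent_dims num_hierarchy_levels isotropic_level hierarchy_method x_extent y_extent z_extent iso out) := by unfold Spec_get_downsampled_extent_dims; infer_instance

-- ===== CLAIM (what is proved, stated in full; the proofs are below) =====
def Claim_equal_get_downsampled_extent_dims : Prop := ∀ (num_hierarchy_levels : Int) (isotropic_level : Int) (hierarchy_method : String) (x_extent : Int) (y_extent : Int) (z_extent : Int) (iso : Bool), Dom_get_downsampled_extent_dims num_hierarchy_levels isotropic_level hierarchy_method x_extent y_extent z_extent iso → Spec_get_downsampled_extent_dims num_hierarchy_levels isotropic_level hierarchy_method x_extent y_extent z_extent iso (get_downsampled_extent_dims num_hierarchy_levels isotropic_level hierarchy_method x_extent y_extent z_extent iso)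

-- ===== LEMMAS AND PROOFS =====

-- pack three columns into rows
def pvZip3 (xs ys zs : List Int) : List (List Int) :=
  (xs.zip (ys.zip zs)).map (fun t => [t.1, t.2.1, t.2.2])

lemma pvZip3_append (xs ys zs : List Int) (a b c : Int)
    (hxy : xs.length = ys.length) (hyz : ys.length = zs.length) :
    pvZip3 (xs ++ [a]) (ys ++ [b]) (zs ++ [c]) = pvZip3 xs ys zs ++ [[a, b, c]] := by
  unfold pvZip3
  rw [List.zip_append (by simpa using hyz), List.zip_append (by simp [hxy, hyz])]
  simp

lemma pv_length_colStepXY (dims : List Int) (r : Int) :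
    (pvColStepXY dims r).length = dims.length + 1 := by
  unfold pvColStepXY; simp

lemma pv_length_colStepZ (il : Int) (hm : String) (iso : Bool) (dims : List Int) (r : Int) :
    (pvColStepZ il hm iso dims r).length = dims.length + 1 := by
  unfold pvColStepZ; split <;> simp

-- one synchronised step: applying A's loop body to the zipped columns is the same as
-- zipping the columns after one step of each column loop
lemma pv_step (il : Int) (hm : String) (iso : Bool) (X Y Z : List Int) (k : Nat) (r : Int)
    (hX : X.length = k + 1) (hY : Y.length = k + 1) (hZ : Z.length = k + 1)
    (hr : r = 1 + (k : Int)) :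
    pvAStep il hm iso (pvZip3 X Y Z) r
      = pvZip3 (pvColStepXY X r) (pvColStepXY Y r) (pvColStepZ il hm iso Z r) := by
  have hXne : X ≠ [] := by intro h; simp [h] at hX
  have hYne : Y ≠ [] := by intro h; simp [h] at hY
  have hZne : Z ≠ [] := by intro h; simp [h] at hZ
  have hXlast : PySem.List.pyGetD X (-1) 0 = X[k]'(by omega) := by
    rw [PySem.List.pyGetD_neg_one (h := hXne), List.getLast_eq_getElem]
    congr 1; omega
  have hYlast : PySem.List.pyGetD Y (-1) 0 = Y[k]'(by omega) := by
    rw [PySem.List.pyGetD_neg_one (h := hYne), List.getLast_eq_getElem]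
    congr 1; omega
  have hZlast : PySem.List.pyGetD Z (-1) 0 = Z[k]'(by omega) := by
    rw [PySem.List.pyGetD_neg_one (h := hZne), List.getLast_eq_getElem]
    congr 1; omega
  have hAlen : (pvZip3 X Y Z).length = k + 1 := by
    unfold pvZip3; simp [hX, hY, hZ]
  have hprev : PySem.List.pyGetD (pvZip3 X Y Z) (r - 1) []
      = [X[k]'(by omega), Y[k]'(by omega), Z[k]'(by omega)] := by
    rw [hr, show (1 + (k : Int)) - 1 = ((k : Nat) : Int) by push_cast; ring,
        PySem.List.pyGetD_natCast,
        List.getD_eq_getElem _ _ (by omega)]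
    unfold pvZip3
    simp [List.getElem_zip]
  have hg0 : PySem.List.pyGetD [X[k]'(by omega), Y[k]'(by omega), Z[k]'(by omega)] 0 0
      = X[k]'(by omega) := by simp [PySem.List.pyGetD, PySem.List.pyIdx?]
  have hg1 : PySem.List.pyGetD [X[k]'(by omega), Y[k]'(by omega), Z[k]'(by omega)] 1 0
      = Y[k]'(by omega) := by simp [PySem.List.pyGetD, PySem.List.pyIdx?]
  have hg2 : PySem.List.pyGetD [X[k]'(by omega), Y[k]'(by omega), Z[k]'(by omega)] 2 0
      = Z[k]'(by omega) := by simp [PySem.List.pyGetD, PySem.List.pyIdx?]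
  unfold pvAStep pvColStepXY pvColStepZ
  simp only [hprev, hg0, hg1, hg2, hXlast, hYlast, hZlast]
  split_ifs <;>
    first
    | tauto
    | rw [pvZip3_append _ _ _ _ _ _ (by omega) (by omega)]

-- the invariant: after k loop iterations A's rows are the zip of B's three columns,
-- and each column has k+1 entries
lemma pv_inv (isotropic_level : Int) (hierarchy_method : String) (iso : Bool)
    (x y z : Int) (k : Nat) :
    (PySem.List.pyRange 1 (1 + (k : Int)) 1).foldl (pvAStep isotropic_level hierarchy_method iso) [[x, y, z]]
      = pvZip3 ((PySem.List.pyRange 1 (1 + (k : Int)) 1).foldl pvColStepXY [x])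
               ((PySem.List.pyRange 1 (1 + (k : Int)) 1).foldl pvColStepXY [y])
               ((PySem.List.pyRange 1 (1 + (k : Int)) 1).foldl (pvColStepZ isotropic_level hierarchy_method iso) [z])
    ∧ ((PySem.List.pyRange 1 (1 + (k : Int)) 1).foldl pvColStepXY [x]).length = k + 1
    ∧ ((PySem.List.pyRange 1 (1 + (k : Int)) 1).foldl pvColStepXY [y]).length = k + 1
    ∧ ((PySem.List.pyRange 1 (1 + (k : Int)) 1).foldl (pvColStepZ isotropic_level hierarchy_method iso) [z]).length = k + 1 := by
  induction k with
  | zero =>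
      simp [pvZip3]
  | succ k ih =>
      obtain ⟨hA, hX, hY, hZ⟩ := ih
      have hsplit : PySem.List.pyRange 1 (1 + ((k+1 : Nat) : Int)) 1
          = PySem.List.pyRange 1 (1 + (k : Int)) 1 ++ [1 + (k : Int)] := by
        have := PySem.List.pyRange_one_succ_right (a := 1) (b := 1 + (k : Int)) (by omega)
        rw [show (1 : Int) + ((k+1 : Nat) : Int) = (1 + (k : Int)) + 1 by push_cast; ring]
        exact this
      rw [hsplit]
      simp only [List.foldl_append, List.foldl_cons, List.foldl_nil]
      rw [hA]
      refine ⟨pv_step _ _ _ _ _ _ _ _ hX hY hZ rfl, ?_, ?_, ?_⟩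
      · rw [pv_length_colStepXY, hX]
      · rw [pv_length_colStepXY, hY]
      · rw [pv_length_colStepZ, hZ]

-- ===== VERDICT (by name: the statement is the Claim_ definition above) =====
theorem get_downsampled_extent_dims_spec : Claim_equal_get_downsampled_extent_dims := by
  intro n il hm x y z iso _
  unfold Spec_get_downsampled_extent_dims get_downsampled_extent_dims get_downsampled_extent_dims_alt
  by_cases hn : n ≤ 1
  · rw [PySem.List.pyRange_one_eq_nil hn]
    simp
  · have hk : (1 : Int) + ((n - 1).toNat : Int) = n := by omega
    have := (pv_inv il hm iso x y z (n - 1).toNat).1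
    rw [hk] at this
    simpa [pvZip3] using this
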